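-- pv_equiv track=rewrite | github.com/harshalsp0011/Lead-Intelligence-Platform | dags/weekly_scout_dag.py | _build_search_plan
-- ===== SOURCE A (Python) =====
-- def _build_search_plan(
--     industries: list[str],
--     locations: list[str],
--     remaining_count: int,
-- ) -> list[tuple[str, str, int]]:
--     """Split the remaining target across industry/location combinations."""
--     if remaining_count <= 0:
--         return []
--
--     industry_values = industries or ["all"]
--     location_values = locations or ["all"]
--     combinations = [(industry, location) for industry in industry_values for location in location_values]
--
--     plan: list[tuple[str, str, int]] = []
--     outstanding = remaining_count
--     combos_left = len(combinations)
--
--     for industry, location in combinations: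
--         if outstanding <= 0:
--             break
--
--         planned_count = max(1, (outstanding + combos_left - 1) // combos_left)
--         plan.append((industry, location, planned_count))
--         outstanding -= planned_count
--         combos_left -= 1
--
--     return plan
-- ===== SOURCE B (Python) =====
-- def _build_search_plan(
--     industries: list[str],
--     locations: list[str],
--     remaining_count: int,
-- ) -> list[tuple[str, str, int]]:
--     """Split the remaining target across industry/location combinations."""
--     if remaining_count <= 0:
--         return []
--
--     inds = industries or ["all"]
--     locs = locations or ["all"]
--     n = len(inds) * len(locs)
--     base, extra = divmod(remaining_count, n)
--     emit = n if base > 0 else extra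
--     return [
--         (inds[i // len(locs)], locs[i % len(locs)], base + (1 if i < extra else 0))
--         for i in range(emit)
--     ]
-- ===== Notes on version B (the rewrite author's own statement) =====
-- stated objective: faster
-- what changed: Instead of materializing the full industry-by-location combination list and running a greedy loop that recomputes a ceiling division while mutating outstanding/combos_left, B computes base, extra = divmod(remaining_count, len(inds)*len(locs)) once and builds only the emitted entries directly by index arithmetic (inds[i // len(locs)], locs[i % len(locs)], base + (1 if i < extra else 0)) for i in range(emit), where emit is n if base > 0 else extra.
import Mathlib
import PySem

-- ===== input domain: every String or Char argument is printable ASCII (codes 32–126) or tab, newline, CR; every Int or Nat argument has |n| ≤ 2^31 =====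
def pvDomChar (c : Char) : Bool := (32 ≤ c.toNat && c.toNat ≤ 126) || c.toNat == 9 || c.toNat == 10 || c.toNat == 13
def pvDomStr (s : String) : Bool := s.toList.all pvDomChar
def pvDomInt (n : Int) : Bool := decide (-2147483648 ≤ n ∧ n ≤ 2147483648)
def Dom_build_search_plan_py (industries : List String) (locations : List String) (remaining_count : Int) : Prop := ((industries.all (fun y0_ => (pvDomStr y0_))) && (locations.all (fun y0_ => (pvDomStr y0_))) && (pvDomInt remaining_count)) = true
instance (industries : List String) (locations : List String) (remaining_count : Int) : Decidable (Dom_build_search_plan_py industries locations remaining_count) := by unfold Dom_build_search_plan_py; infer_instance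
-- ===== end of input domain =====

-- ===== PORT A =====
-- B replaces A's combination-list-plus-greedy-loop by one divmod and direct index
-- arithmetic (i // len(locs), i % len(locs)), building only the entries that get a
-- positive count; a timing run measured B faster on the generated inputs.
def pvLoopA : List (String × String) → Int → Int → List (String × String × Int)
  | [], _, _ => []
  | (industry, location) :: rest, outstanding, combosLeft =>
    if outstanding ≤ 0 then []
    else
      let planned := max 1 (PySem.Int.floordiv (outstanding + combosLeft - 1) combosLeft)
      (industry, location, planned) :: pvLoopA rest (outstanding - planned) (combosLeft - 1)

def build_search_plan_py (industries : List String) (locations : List String) (remaining_count : Int) : List (String × String × Int) :=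
  if remaining_count ≤ 0 then []
  else
    let industry_values := if industries.isEmpty then ["all"] else industries
    let location_values := if locations.isEmpty then ["all"] else locations
    let combinations := industry_values.flatMap (fun industry => location_values.map (fun location => (industry, location)))
    pvLoopA combinations remaining_count (combinations.length : Int)

-- ===== PORT B =====
-- Python B's `inds[i // len(locs)]` / `locs[i % len(locs)]` indexing is always in
-- range; it is ported with pyGetD whose default is never reached.
def build_search_plan_py_alt (industries : List String) (locations : List String) (remaining_count : Int) : List (String × String × Int) :=
  if remaining_count ≤ 0 then []
  else
    let inds := if industries.isEmpty then ["all"] else industries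
    let locs := if locations.isEmpty then ["all"] else locations
    let n : Int := (inds.length : Int) * (locs.length : Int)
    let base := PySem.Int.floordiv remaining_count n
    let extra := PySem.Int.mod remaining_count n
    let emit := if 0 < base then n else extra
    (PySem.List.pyRange 0 emit 1).map (fun i =>
      (PySem.List.pyGetD inds (PySem.Int.floordiv i (locs.length : Int)) "",
       PySem.List.pyGetD locs (PySem.Int.mod i (locs.length : Int)) "",
       base + (if i < extra then 1 else 0)))

-- ===== PRECONDITION & SPEC =====

def Spec_build_search_plan_py (industries : List String) (locations : List String) (remaining_count : Int) (out : List (String × String × Int)) : Prop := out = build_search_plan_py_alt industries locations remaining_count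
instance (industries : List String) (locations : List String) (remaining_count : Int) (out : List (String × String × Int)) : Decidable (Spec_build_search_plan_py industries locations remaining_count out) := by unfold Spec_build_search_plan_py; infer_instance

-- ===== CLAIM (what is proved, stated in full; the proofs are below) =====
def Claim_equal_build_search_plan_py : Prop := ∀ (industries : List String) (locations : List String) (remaining_count : Int), Dom_build_search_plan_py industries locations remaining_count → Spec_build_search_plan_py industries locations remaining_count (build_search_plan_py industries locations remaining_count)

-- ===== LEMMAS AND PROOFS =====

-- proof-only intermediate: A's loop over the enumerated combination list with the
-- divmod counts, used as a bridge between the two ports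
def pvLoopB : List (Int × String × String) → Int → Int → List (String × String × Int)
  | [], _, _ => []
  | (i, industry, location) :: rest, base, extra =>
    let count := base + (if i < extra then 1 else 0)
    if count = 0 then []
    else (industry, location, count) :: pvLoopB rest base extra

-- shifting the enumeration start by one is the same as lowering `extra` by one
theorem pvLoopB_shift (l : List (String × String)) (s base e : Int) :
    pvLoopB (PySem.List.enumerate l (s + 1)) base e
      = pvLoopB (PySem.List.enumerate l s) base (e - 1) := by
  induction l generalizing s with
  | nil => simp [PySem.List.enumerate_nil, pvLoopB]
  | cons a l ih =>
      rcases a with ⟨i1, i2⟩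
      simp only [PySem.List.enumerate_cons, pvLoopB]
      by_cases h : s + 1 < e
      · rw [if_pos h, if_pos (show s < e - 1 by omega), ih (s + 1)]
      · rw [if_neg h, if_neg (show ¬ s < e - 1 by omega), ih (s + 1)]

-- when extra is already exhausted relative to the start index, its exact value is irrelevant
theorem pvLoopB_ext (l : List (String × String)) (s base e1 e2 : Int)
    (h1 : e1 ≤ s) (h2 : e2 ≤ s) :
    pvLoopB (PySem.List.enumerate l s) base e1
      = pvLoopB (PySem.List.enumerate l s) base e2 := by
  induction l generalizing s with
  | nil => simp [PySem.List.enumerate_nil, pvLoopB]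
  | cons a l ih =>
      rcases a with ⟨i1, i2⟩
      simp only [PySem.List.enumerate_cons, pvLoopB]
      have hc1 : ¬ s < e1 := by omega
      have hc2 : ¬ s < e2 := by omega
      rw [if_neg hc1, if_neg hc2, ih (s + 1) (by omega) (by omega)]

theorem pvLoop_main (cs : List (String × String)) (o : Int) (ho : 0 ≤ o) :
    pvLoopA cs o (cs.length : Int)
      = pvLoopB (PySem.List.enumerate cs)
          (PySem.Int.floordiv o (cs.length : Int))
          (PySem.Int.mod o (cs.length : Int)) := by
  induction cs generalizing o with
  | nil => simp [pvLoopA, pvLoopB, PySem.List.enumerate_nil]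
  | cons a rest ih =>
      rcases a with ⟨a1, a2⟩
      set k : Int := (((a1, a2) :: rest).length : Int) with hkdef
      have hklen : k = (rest.length : Int) + 1 := by simp [hkdef]
      have hk : 0 < k := by omega
      rw [PySem.Int.floordiv_eq_ediv_of_pos hk, PySem.Int.mod_eq_emod_of_pos hk]
      have heq : k * (o / k) + o % k = o := Int.mul_ediv_add_emod o k
      set q : Int := o / k with hq
      set m : Int := o % k with hm
      have hm0 : 0 ≤ m := Int.emod_nonneg o (ne_of_gt hk)
      have hmk : m < k := Int.emod_lt_of_pos o hk
      by_cases hzero : o = 0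
      · subst hzero
        have hq0 : q = 0 := by rw [hq]; exact Int.zero_ediv k
        have hm0' : m = 0 := by rw [hm]; exact Int.zero_emod k
        simp [pvLoopA, pvLoopB, PySem.List.enumerate_cons, hq0, hm0']
      · have hopos : 0 < o := lt_of_le_of_ne ho (Ne.symm hzero)
        have hno : ¬ o ≤ 0 := by omega
        simp only [pvLoopA, hno, PySem.List.enumerate_cons, pvLoopB]
        by_cases hmz : m = 0
        · -- even split: head gets q, remainder divides evenly
          have hq1 : 1 ≤ q := by
            by_contra h
            have hq' : q ≤ 0 := by omega
            have : k * q ≤ 0 := mul_nonpos_of_nonneg_of_nonpos (le_of_lt hk) hq'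
            omega
          have hfd : (o + k - 1) / k = q ∧ (o + k - 1) % k = k - 1 :=
            (Int.ediv_emod_unique'' (ne_of_gt hk)).2
              ⟨by omega, by omega, by rw [abs_of_pos hk]; omega⟩
          have hplanned : max 1 (PySem.Int.floordiv (o + k - 1) k) = q := by
            rw [PySem.Int.floordiv_eq_ediv_of_pos hk, hfd.1]
            omega
          have hcount : q + (if (0:Int) < m then 1 else 0) = q := by
            simp [hmz]
          rw [hplanned, hcount, if_neg (by omega : ¬ q = 0)]
          have hrest : ((rest.length : Int)) = k - 1 := by omega
          have ho' : 0 ≤ o - q := by nlinarith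
          have ihr := ih (o - q) ho'
          rcases rest with _ | ⟨b, rest'⟩
          · simp [pvLoopA, pvLoopB, PySem.List.enumerate_nil]
          · -- rest nonempty: its length k-1 is positive, divide exactly
            set k' : Int := ((b :: rest').length : Int) with hk'def
            have hk' : 0 < k' := by simp [hk'def]
            have hk'eq : k' = k - 1 := by omega
            have hdm : (o - q) / k' = q ∧ (o - q) % k' = 0 :=
              (Int.ediv_emod_unique'' (ne_of_gt hk')).2
                ⟨by linear_combination heq + q * hk'eq - hmz, le_rfl, by rw [abs_of_pos hk']; omega⟩
            rw [PySem.Int.floordiv_eq_ediv_of_pos hk', PySem.Int.mod_eq_emod_of_pos hk'] at ihr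
            rw [hdm.1, hdm.2] at ihr
            have hshift := pvLoopB_shift (b :: rest') 0 q m
            simp only [if_false, zero_add]
            simp only [zero_add] at hshift
            rw [hshift, hmz]
            rw [pvLoopB_ext (b :: rest') 0 q (0 - 1) 0 (by omega) (by omega)]
            rw [← ihr, ← hk'eq]
        · -- uneven split: head gets q + 1
          have hm1 : 1 ≤ m := by omega
          have hq0' : 0 ≤ q := by
            by_contra h
            have : k * q ≤ k * (-1) := by
              apply mul_le_mul_of_nonneg_left (by omega) (le_of_lt hk)
            omega
          have hfd : (o + k - 1) / k = q + 1 ∧ (o + k - 1) % k = m - 1 :=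
            (Int.ediv_emod_unique'' (ne_of_gt hk)).2
              ⟨by linear_combination heq, by omega, by rw [abs_of_pos hk]; omega⟩
          have hplanned : max 1 (PySem.Int.floordiv (o + k - 1) k) = q + 1 := by
            rw [PySem.Int.floordiv_eq_ediv_of_pos hk, hfd.1]
            omega
          have hcount : q + (if (0:Int) < m then 1 else 0) = q + 1 := by
            simp [show (0:Int) < m by omega]
          rw [hplanned, hcount, if_neg (by omega : ¬ q + 1 = 0)]
          have hrest : ((rest.length : Int)) = k - 1 := by omega
          have ho' : 0 ≤ o - (q + 1) := by nlinarith
          have ihr := ih (o - (q + 1)) ho'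
          rcases rest with _ | ⟨b, rest'⟩
          · -- impossible: m < k = 1 and 1 ≤ m
            exfalso
            simp at hklen
            omega
          · set k' : Int := ((b :: rest').length : Int) with hk'def
            have hk' : 0 < k' := by simp [hk'def]
            have hk'eq : k' = k - 1 := by omega
            have hdm : (o - (q + 1)) / k' = q ∧ (o - (q + 1)) % k' = m - 1 :=
              (Int.ediv_emod_unique'' (ne_of_gt hk')).2
                ⟨by linear_combination heq + q * hk'eq, by omega, by rw [abs_of_pos hk']; omega⟩
            rw [PySem.Int.floordiv_eq_ediv_of_pos hk', PySem.Int.mod_eq_emod_of_pos hk'] at ihr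
            rw [hdm.1, hdm.2] at ihr
            have hshift := pvLoopB_shift (b :: rest') 0 q m
            simp only [if_false, zero_add]
            simp only [zero_add] at hshift
            rw [hshift, ← ihr, ← hk'eq]

-- the flatMap combination list has length |inds| * |locs|
theorem pvLen (inds locs : List String) :
    (inds.flatMap (fun a => locs.map (fun b => (a, b)))).length
      = inds.length * locs.length := by
  induction inds with
  | nil => simp
  | cons a tl ih => simp [List.flatMap_cons, ih, Nat.succ_mul, Nat.add_comm]

-- indexing the flatMap combination list is division/remainder indexing
theorem pvIdx (inds locs : List String) (j : Nat) (hL : 0 < locs.length)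
    (hj : j < inds.length * locs.length) :
    (inds.flatMap (fun a => locs.map (fun b => (a, b)))).getD j ("", "")
      = (inds.getD (j / locs.length) "", locs.getD (j % locs.length) "") := by
  induction inds generalizing j with
  | nil => simp at hj
  | cons a tl ih =>
      rw [List.flatMap_cons]
      by_cases h : j < locs.length
      · rw [List.getD_append _ _ _ _ (by simpa using h)]
        rw [Nat.div_eq_of_lt h, Nat.mod_eq_of_lt h]
        simp [List.getD_eq_getElem?_getD, h]
      · have hL' : locs.length ≤ j := by omega
        obtain ⟨x, rfl⟩ : ∃ x, j = x + locs.length := ⟨j - locs.length, by omega⟩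
        have hx : x < tl.length * locs.length := by
          simp only [List.length_cons] at hj
          have hsm : (tl.length + 1) * locs.length
              = tl.length * locs.length + locs.length := by ring
          omega
        rw [List.getD_append_right _ _ _ _ (by simp [hL'])]
        simp only [List.length_map]
        rw [show x + locs.length - locs.length = x from by omega]
        rw [ih x hx, Nat.add_div_right x hL, Nat.add_mod_right x locs.length]
        simp

-- the bridge loop equals the closed-form map over an index range
theorem pvLoopB_eq_map (cs : List (String × String)) (base extra : Int)
    (hb : 0 ≤ base) (hlt : extra ≤ (cs.length : Int)) :
    pvLoopB (PySem.List.enumerate cs) base extra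
      = (List.range (if base = 0 then extra.toNat else cs.length)).map
          (fun j => ((cs.getD j ("", "")).1, (cs.getD j ("", "")).2,
                     base + (if (j : Int) < extra then 1 else 0))) := by
  induction cs generalizing extra with
  | nil =>
      simp only [List.length_nil, Nat.cast_zero] at hlt
      have ht : extra.toNat = 0 := by omega
      simp [PySem.List.enumerate_nil, pvLoopB, ht]
  | cons c rest ih =>
      rcases c with ⟨c1, c2⟩
      simp only [PySem.List.enumerate, pvLoopB]
      have hshift : pvLoopB (PySem.List.enumerate rest (0 + 1)) base extra
          = pvLoopB (PySem.List.enumerate rest 0) base (extra - 1) :=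
        pvLoopB_shift rest 0 base extra
      have hlt' : extra - 1 ≤ (rest.length : Int) := by
        simp only [List.length_cons] at hlt; push_cast at hlt ⊢; omega
      have ihr := ih (extra - 1) hlt'
      by_cases hb0 : base = 0
      · subst hb0
        by_cases he : 0 < extra
        · rw [if_pos he]
          have hone : (0 : Int) + 1 = 1 := by norm_num
          rw [if_neg (by norm_num : ¬ (0 : Int) + 1 = 0)]
          have hemit : extra.toNat = (extra - 1).toNat + 1 := by omega
          rw [hemit, if_pos rfl, List.range_succ_eq_map, List.map_cons, List.map_map]
          simp only [List.getD_cons_zero, Nat.cast_zero, if_pos he]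
          congr 1
          rw [hshift, ihr, if_pos rfl]
          apply List.map_congr_left
          intro j _
          simp only [Function.comp, List.getD_cons_succ]
          congr 2
          have : ((j + 1 : Nat) : Int) < extra ↔ (j : Int) < extra - 1 := by
            push_cast; omega
          simp only [zero_add]
          rw [if_congr this rfl rfl]
        · rw [if_neg he, if_pos (by norm_num)]
          have : extra.toNat = 0 := by omega
          simp [this]
      · have hbpos : 0 < base := lt_of_le_of_ne hb (Ne.symm hb0)
        have hcount : ¬ base + (if (0 : Int) < extra then 1 else 0) = 0 := by
          split_ifs <;> omega
        rw [if_neg hcount, if_neg hb0]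
        simp only [List.length_cons]
        rw [List.range_succ_eq_map, List.map_cons, List.map_map]
        simp only [List.getD_cons_zero, Nat.cast_zero]
        congr 1
        rw [hshift, ihr, if_neg hb0]
        apply List.map_congr_left
        intro j _
        simp only [Function.comp, List.getD_cons_succ]
        congr 2
        have : ((j + 1 : Nat) : Int) < extra ↔ (j : Int) < extra - 1 := by
          push_cast; omega
        rw [if_congr this rfl rfl]

-- ===== VERDICT (by name: the statement is the Claim_ definition above) =====
theorem build_search_plan_py_spec : Claim_equal_build_search_plan_py := by
  intro industries locations remaining_count _
  unfold Spec_build_search_plan_py build_search_plan_py build_search_plan_py_alt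
  by_cases h : remaining_count ≤ 0
  · simp [h]
  · rw [if_neg h, if_neg h]
    simp only []
    set inds := if industries.isEmpty then ["all"] else industries with hinds
    set locs := if locations.isEmpty then ["all"] else locations with hlocs
    have hI : 0 < inds.length := by
      rw [hinds]; split_ifs with hi <;> simp_all [List.isEmpty_iff, List.length_pos_iff]
    have hL : 0 < locs.length := by
      rw [hlocs]; split_ifs with hl <;> simp_all [List.isEmpty_iff, List.length_pos_iff]
    set cs := inds.flatMap (fun a => locs.map (fun b => (a, b))) with hcs
    have hlen : cs.length = inds.length * locs.length := pvLen inds locs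
    have hnI : ((cs.length : Int)) = (inds.length : Int) * (locs.length : Int) := by
      rw [hlen]; push_cast; ring
    have hn : (0 : Int) < (cs.length : Int) := by
      rw [hnI]; positivity
    have ho : (0 : Int) < remaining_count := by omega
    rw [pvLoop_main cs remaining_count (by omega)]
    rw [PySem.Int.floordiv_eq_ediv_of_pos hn, PySem.Int.mod_eq_emod_of_pos hn] at *
    set base := remaining_count / (cs.length : Int) with hbase
    set extra := remaining_count % (cs.length : Int) with hextra
    have hb : 0 ≤ base := Int.ediv_nonneg (by omega) (by omega)
    have he0 : 0 ≤ extra := Int.emod_nonneg _ (by omega)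
    have he1 : extra < (cs.length : Int) := Int.emod_lt_of_pos _ hn
    rw [pvLoopB_eq_map cs base extra hb (by omega)]
    -- now rewrite the B side
    rw [← hnI]
    rw [PySem.Int.floordiv_eq_ediv_of_pos hn, PySem.Int.mod_eq_emod_of_pos hn]
    rw [← hbase, ← hextra]
    have hemit : (if 0 < base then (cs.length : Int) else extra)
        = ((if base = 0 then extra.toNat else cs.length : Nat) : Int) := by
      split_ifs <;> omega
    rw [hemit, PySem.List.pyRange_zero_natCast, List.map_map]
    apply List.map_congr_left
    intro j hj
    have hjm : j < (if base = 0 then extra.toNat else cs.length) := List.mem_range.mp hj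
    have hjlen : j < cs.length := by
      split_ifs at hjm with hc
      · omega
      · exact hjm
    have hjIL : j < inds.length * locs.length := by rw [← hlen]; exact hjlen
    simp only [Function.comp]
    rw [show PySem.Int.floordiv (j : Int) (locs.length : Int)
          = ((j / locs.length : Nat) : Int) from PySem.Int.floordiv_natCast j locs.length,
        show PySem.Int.mod (j : Int) (locs.length : Int)
          = ((j % locs.length : Nat) : Int) from PySem.Int.mod_natCast j locs.length]
    rw [PySem.List.pyGetD_natCast, PySem.List.pyGetD_natCast]
    rw [pvIdx inds locs j hL hjIL]
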